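-- pv_equiv track=rewrite | github.com/rabumaabraham/DSA-UC-San-Diego | suffix_array_matching.py | sort_characters_local
-- ===== SOURCE A (Python) =====
-- def sort_characters_local(s):
--     n = len(s)
--     alphabet = sorted(set(s))
--     char_to_idx = {c: i for i, c in enumerate(alphabet)}
--     count = [0] * len(alphabet)
--     for ch in s:
--         count[char_to_idx[ch]] += 1
--     pos = [0] * len(alphabet)
--     for i in range(1, len(alphabet)):
--         pos[i] = pos[i-1] + count[i-1]
--     order = [0] * n
--     for i in range(n):
--         cidx = char_to_idx[s[i]]
--         order[pos[cidx]] = i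
--         pos[cidx] += 1
--     return order
-- ===== SOURCE B (Python) =====
-- def sort_characters_local(s):
--     order = []
--     for c in sorted(set(s)):
--         for i, ch in enumerate(s):
--             if ch == c:
--                 order.append(i)
--     return order
-- ===== Notes on version B (the rewrite author's own statement) =====
-- stated objective: simpler
-- what changed: Replaced the counting-sort machinery (count array, prefix-sum pass, scatter into a preallocated array via a char->index dict) with a direct bucket collection: for each distinct character in sorted order, append the indices of its occurrences; no counts, positions, dict or in-place writes are built.
import Mathlib
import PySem

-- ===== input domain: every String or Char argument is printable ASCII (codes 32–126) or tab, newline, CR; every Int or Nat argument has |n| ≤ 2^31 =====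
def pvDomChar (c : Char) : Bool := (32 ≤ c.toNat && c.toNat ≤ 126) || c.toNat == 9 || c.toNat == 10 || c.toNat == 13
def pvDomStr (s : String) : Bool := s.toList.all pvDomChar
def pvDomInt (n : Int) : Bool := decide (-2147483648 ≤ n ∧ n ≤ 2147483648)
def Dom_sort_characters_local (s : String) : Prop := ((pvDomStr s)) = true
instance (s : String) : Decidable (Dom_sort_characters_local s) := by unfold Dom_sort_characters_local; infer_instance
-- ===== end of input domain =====

-- B collects, for each distinct character in sorted order, the indices of its occurrences;
-- this replaces A's counting-sort (count array, prefix sums, scatter) — objective: simpler.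

-- ===== PORT A =====
-- xs[i] = v for 0 ≤ i < len(xs) (the only indices A produces; Python raises IndexError otherwise)
def pyListSet {α : Type} (xs : List α) (i : Int) (v : α) : List α :=
  if 0 ≤ i ∧ i.toNat < xs.length then xs.set i.toNat v else xs

-- loop bodies of A, named so the proofs can refer to them (each is the literal Python statement block)
def countStep (char_to_idx : PySem.Dict Char Int) (cnt : List Int) (ch : Char) : List Int :=
  match char_to_idx.get? ch with
  | some j => pyListSet cnt j (PySem.List.pyGetD cnt j 0 + 1)
  | none   => cnt  -- KeyError unreachable: every ch of s is in alphabet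

def scatterStep (char_to_idx : PySem.Dict Char Int) (s : String)
    (st : List Int × List Int) (i : Int) : List Int × List Int :=
  match PySem.Str.pyGet? s i with
  | some ch =>
    match char_to_idx.get? ch with
    | some j =>
        (pyListSet st.1 (PySem.List.pyGetD st.2 j 0) i,
         pyListSet st.2 j (PySem.List.pyGetD st.2 j 0 + 1))
    | none => st  -- KeyError unreachable
  | none => st    -- IndexError unreachable: 0 <= i < len(s)

def sort_characters_local (s : String) : List Int :=
  let cs := s.toList
  let n : Int := PySem.Str.len s
  let alphabet : List Char := PySem.List.sorted (PySem.Set.ofList cs) (fun c => c) false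
  let char_to_idx : PySem.Dict Char Int :=
    (PySem.List.enumerate alphabet 0).foldl (fun d p => d.insert p.2 p.1) PySem.Dict.empty
  let count : List Int :=
    cs.foldl (countStep char_to_idx) (PySem.List.pyRepeat [(0 : Int)] (alphabet.length : Int))
  let pos : List Int :=
    (PySem.List.pyRange 1 (alphabet.length : Int) 1).foldl (fun pos i =>
      pyListSet pos i (PySem.List.pyGetD pos (i - 1) 0 + PySem.List.pyGetD count (i - 1) 0))
      (PySem.List.pyRepeat [(0 : Int)] (alphabet.length : Int))
  let fin : List Int × List Int :=
    (PySem.List.pyRange 0 n 1).foldl (scatterStep char_to_idx s)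
      (PySem.List.pyRepeat [(0 : Int)] n, pos)
  fin.1

-- ===== PORT B =====
def sort_characters_local_alt (s : String) : List Int :=
  let cs := s.toList
  (PySem.List.sorted (PySem.Set.ofList cs) (fun c => c) false).foldl
    (fun order c =>
      (PySem.List.enumerate cs 0).foldl
        (fun order p => if p.2 == c then order ++ [p.1] else order) order)
    []

-- ===== PRECONDITION & SPEC =====
def Spec_sort_characters_local (s : String) (out : List Int) : Prop := out = sort_characters_local_alt s
instance (s : String) (out : List Int) : Decidable (Spec_sort_characters_local s out) := by unfold Spec_sort_characters_local; infer_instance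

-- ===== CLAIM (what is proved, stated in full; the proofs are below) =====
def Claim_equal_sort_characters_local : Prop := ∀ (s : String), Dom_sort_characters_local s → Spec_sort_characters_local s (sort_characters_local s)

-- ===== LEMMAS AND PROOFS =====

-- ===== helper definitions for the proofs =====
def occIn (e1 : List (Int × Char)) (c : Char) : List Int :=
  (e1.filter (fun p => p.2 == c)).map (·.1)

def bucket (cs : List Char) (e1 : List (Int × Char)) (c : Char) : List Int :=
  occIn e1 c ++ List.replicate (cs.count c - (occIn e1 c).length) (0 : Int)

def baseN (cs alpha : List Char) (j : Nat) : Nat :=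
  ((alpha.take j).map (fun c => cs.count c)).sum

def posModel (cs alpha : List Char) (e1 : List (Int × Char)) : List Int :=
  (List.range alpha.length).map
    (fun j => ((baseN cs alpha j + (occIn e1 (alpha.getD j ' ')).length : Nat) : Int))

def orderModel (cs alpha : List Char) (e1 : List (Int × Char)) : List Int :=
  alpha.flatMap (bucket cs e1)

def stepF (alpha : List Char) (st : List Int × List Int) (p : Int × Char) : List Int × List Int :=
  (pyListSet st.1 (PySem.List.pyGetD st.2 ((List.idxOf p.2 alpha : Nat) : Int) 0) p.1,
   pyListSet st.2 ((List.idxOf p.2 alpha : Nat) : Int)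
     (PySem.List.pyGetD st.2 ((List.idxOf p.2 alpha : Nat) : Int) 0 + 1))

-- ===== small lemmas =====
theorem occIn_nil (c : Char) : occIn [] c = [] := rfl

theorem occIn_append (e1 e2 : List (Int × Char)) (c : Char) :
    occIn (e1 ++ e2) c = occIn e1 c ++ occIn e2 c := by
  simp [occIn, List.filter_append]

theorem occIn_single (i : Int) (ch c : Char) :
    occIn [(i, ch)] c = if ch = c then [i] else [] := by
  by_cases h : ch = c <;> simp [occIn, List.filter_cons, h]

theorem length_occIn (e1 : List (Int × Char)) (c : Char) :
    (occIn e1 c).length = e1.countP (fun p => p.2 == c) := by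
  simp [occIn, List.countP_eq_length_filter]

theorem countP_enumerate (cs : List Char) (c : Char) (k : Int) :
    (PySem.List.enumerate cs k).countP (fun p => p.2 == c) = cs.count c := by
  induction cs generalizing k with
  | nil => simp [PySem.List.enumerate_nil]
  | cons a t ih =>
      simp only [PySem.List.enumerate_cons, List.countP_cons, List.count_cons, ih]

theorem snd_mem_of_mem_enumerate {cs : List Char} {k : Int} {p : Int × Char}
    (h : p ∈ PySem.List.enumerate cs k) : p.2 ∈ cs := by
  rw [PySem.List.mem_enumerate_iff] at h
  obtain ⟨j, hj, rfl⟩ := h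
  simp

theorem set_map_range {k j : Nat} (hj : j < k) (g : Nat → Int) (v : Int) :
    ((List.range k).map g).set j v
      = (List.range k).map (fun j' => if j' = j then v else g j') := by
  apply List.ext_getElem (by simp)
  intro n h1 h2
  simp only [List.length_set, List.length_map, List.length_range] at h1 h2
  rw [List.getElem_set]
  by_cases hc : j = n
  · simp [hc]
  · simp [hc, Ne.symm hc]

theorem sum_ite_one (alpha : List Char) (c : Char) (hnd : alpha.Nodup) (hc : c ∈ alpha) :
    (alpha.map (fun x => if x = c then (1 : Nat) else 0)).sum = 1 := by
  induction alpha with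
  | nil => cases hc
  | cons a t ih =>
      rcases List.mem_cons.mp hc with hca | hct
      · subst hca
        have hnt : c ∉ t := (List.nodup_cons.mp hnd).1
        simp only [List.map_cons, List.sum_cons]
        rw [if_pos trivial]
        have hz : (t.map (fun x => if x = c then (1:Nat) else 0)).sum = 0 := by
          apply List.sum_eq_zero
          intro x hx
          simp only [List.mem_map] at hx
          obtain ⟨y, hy, rfl⟩ := hx
          have : y ≠ c := fun h => hnt (h ▸ hy)
          simp [this]
        omega
      · have hna : a ≠ c := by
          rintro rfl; exact (List.nodup_cons.mp hnd).1 hct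
        simp only [List.map_cons, List.sum_cons, if_neg hna]
        rw [ih (List.nodup_cons.mp hnd).2 hct]

theorem sum_counts (alpha cs : List Char) (hnd : alpha.Nodup) (h : ∀ c ∈ cs, c ∈ alpha) :
    (alpha.map (fun c => cs.count c)).sum = cs.length := by
  induction cs with
  | nil => simp
  | cons c t ih =>
      have hmap : (alpha.map (fun x => (c :: t).count x))
          = alpha.map (fun x => t.count x + if x = c then 1 else 0) := by
        apply List.map_congr_left
        intro x hx
        rw [List.count_cons]
        by_cases hxc : x = c
        · subst hxc; simp
        · have hb : (c == x) = false := by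
            simp [beq_eq_false_iff_ne]; exact fun h => hxc h.symm
          simp [hb, hxc]
      rw [hmap, List.sum_map_add, ih (fun a ha => h a (List.mem_cons_of_mem _ ha)),
        sum_ite_one alpha c hnd (h c (List.mem_cons_self))]
      simp

theorem flatMap_replicate (alpha : List Char) (f : Char → Nat) :
    alpha.flatMap (fun c => List.replicate (f c) (0 : Int))
      = List.replicate ((alpha.map f).sum) 0 := by
  induction alpha with
  | nil => simp
  | cons a t ih =>
      simp only [List.flatMap_cons, ih, List.map_cons, List.sum_cons]
      rw [List.replicate_add]
theorem dict_get (alpha : List Char) (hnd : alpha.Nodup) (c : Char) (hc : c ∈ alpha) :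
    ((PySem.List.enumerate alpha 0).foldl (fun d p => d.insert p.2 p.1) PySem.Dict.empty).get? c
      = some ((List.idxOf c alpha : Nat) : Int) := by
  have hfresh : ∀ a ∈ PySem.List.enumerate alpha 0, (PySem.Dict.empty : PySem.Dict Char Int).contains a.2 = false := by
    intro a _; simp [PySem.Dict.contains_empty]
  have hkeys : ((PySem.List.enumerate alpha 0).map (·.2)).Nodup := by
    rw [PySem.List.map_snd_enumerate]; exact hnd
  have hitems := PySem.Dict.items_foldl_insert_fresh (l := PySem.List.enumerate alpha 0)
      (k := (·.2)) (v := (·.1)) (d := PySem.Dict.empty) hfresh hkeys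
  have hkeysnd : ((PySem.List.enumerate alpha 0).foldl (fun d p => d.insert p.2 p.1) PySem.Dict.empty).keys.Nodup := by
    apply PySem.Dict.nodup_keys_foldl_insert_key
    simp [PySem.Dict.keys_empty]
  refine PySem.Dict.get?_of_mem_items _ ?_ hkeysnd
  rw [hitems]
  refine List.mem_append.mpr (Or.inr ?_)
  simp only [List.mem_map]
  refine ⟨((List.idxOf c alpha : Nat), c), ?_, rfl⟩
  rw [PySem.List.mem_enumerate_iff]
  have hlt : List.idxOf c alpha < alpha.length := List.idxOf_lt_length_of_mem hc
  exact ⟨List.idxOf c alpha, hlt, by simp [List.getElem_idxOf hlt]⟩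

theorem getD_eq_iff_idxOf (alpha : List Char) (hnd : alpha.Nodup) (c : Char) (hc : c ∈ alpha)
    {j : Nat} (hj : j < alpha.length) :
    alpha.getD j ' ' = c ↔ j = List.idxOf c alpha := by
  have hlt : List.idxOf c alpha < alpha.length := List.idxOf_lt_length_of_mem hc
  rw [List.getD_eq_getElem _ _ hj]
  constructor
  · intro h
    have : alpha[j] = alpha[List.idxOf c alpha] := by rw [h, List.getElem_idxOf hlt]
    exact (hnd.getElem_inj_iff.mp this)
  · rintro rfl; exact List.getElem_idxOf hlt

theorem pyGetD_map_range (k j : Nat) (hj : j < k) (g : Nat → Int) :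
    PySem.List.pyGetD ((List.range k).map g) ((j : Nat) : Int) 0 = g j := by
  rw [PySem.List.pyGetD_natCast]
  have hlen : j < ((List.range k).map g).length := by simp [hj]
  rw [List.getD_eq_getElem _ _ hlen]
  simp

theorem pyListSet_map_range (k j : Nat) (hj : j < k) (g : Nat → Int) (v : Int) :
    pyListSet ((List.range k).map g) ((j : Nat) : Int) v
      = (List.range k).map (fun j' => if j' = j then v else g j') := by
  unfold pyListSet
  rw [if_pos (by simp [hj])]
  simp only [Int.toNat_natCast]
  exact set_map_range hj g v

theorem count_fold (alpha : List Char) (hnd : alpha.Nodup) :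
    ∀ (l : List Char), (∀ c ∈ l, c ∈ alpha) → ∀ (g : Nat → Int),
    l.foldl (fun cnt ch =>
        pyListSet cnt ((List.idxOf ch alpha : Nat) : Int)
          (PySem.List.pyGetD cnt ((List.idxOf ch alpha : Nat) : Int) 0 + 1))
      ((List.range alpha.length).map g)
    = (List.range alpha.length).map (fun j => g j + (l.count (alpha.getD j ' ') : Int)) := by
  intro l
  induction l with
  | nil => intro _ g; simp
  | cons ch t ih =>
      intro hl g
      have hch : ch ∈ alpha := hl ch (List.mem_cons_self)
      have hlt : List.idxOf ch alpha < alpha.length := List.idxOf_lt_length_of_mem hch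
      simp only [List.foldl_cons]
      rw [pyGetD_map_range _ _ hlt, pyListSet_map_range _ _ hlt]
      rw [ih (fun c hc => hl c (List.mem_cons_of_mem _ hc))]
      apply List.map_congr_left
      intro j hj
      simp only [List.mem_range] at hj
      by_cases hjc : j = List.idxOf ch alpha
      · subst hjc
        have hgd : alpha.getD (List.idxOf ch alpha) ' ' = ch :=
          (getD_eq_iff_idxOf alpha hnd ch hch hj).mpr rfl
        rw [if_pos rfl, hgd, List.count_cons]
        simp; omega
      · have hgd : alpha.getD j ' ' ≠ ch := fun h => hjc ((getD_eq_iff_idxOf alpha hnd ch hch hj).mp h)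
        rw [if_neg hjc, List.count_cons]
        have hb : (ch == alpha.getD j ' ') = false := by
          simp [beq_eq_false_iff_ne]; exact fun h => hgd h.symm
        simp [hb]
        intro h
        exact hgd (by rw [List.getD_eq_getElem?_getD]; exact h.symm)
theorem map_range_zero_eq_replicate (k : Nat) :
    (List.range k).map (fun _ => (0 : Int)) = List.replicate k 0 := by
  apply List.ext_getElem (by simp)
  intro n h1 h2; simp

theorem pos_fold (k : Nat) (cntf : Nat → Int) :
    ∀ m : Nat, 1 ≤ m → m ≤ k →
    (PySem.List.pyRange 1 (m : Int) 1).foldl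
      (fun pos i => pyListSet pos i
        (PySem.List.pyGetD pos (i - 1) 0 + PySem.List.pyGetD ((List.range k).map cntf) (i - 1) 0))
      ((List.range k).map (fun _ => (0 : Int)))
    = (List.range k).map (fun j => if j < m then ((List.range j).map cntf).sum else 0) := by
  intro m
  induction m with
  | zero => intro h; omega
  | succ m ih =>
      intro _ hmk
      by_cases hm0 : m = 0
      · subst hm0
        rw [PySem.List.pyRange_one_eq_nil (by norm_num)]
        simp only [List.foldl_nil]
        apply List.map_congr_left
        intro j hj
        by_cases hj1 : j < 1
        · have : j = 0 := by omega
          simp [this]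
        · simp [hj1]
      · have hm1 : 1 ≤ m := by omega
        have hcast : ((m + 1 : Nat) : Int) = (m : Int) + 1 := by push_cast; ring
        rw [hcast, PySem.List.pyRange_one_succ_right (show (1:Int) ≤ (m:Int) by exact_mod_cast hm1),
          List.foldl_append, ih hm1 (by omega)]
        simp only [List.foldl_cons, List.foldl_nil]
        have hm1c : (m : Int) - 1 = ((m - 1 : Nat) : Int) := by
          rw [Nat.cast_sub hm1]; simp
        rw [hm1c, pyGetD_map_range k (m-1) (by omega), pyGetD_map_range k (m-1) (by omega),
          pyListSet_map_range k m (by omega)]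
        have hpf : (if m - 1 < m then ((List.range (m-1)).map cntf).sum else 0) + cntf (m - 1)
            = ((List.range m).map cntf).sum := by
          rw [if_pos (by omega)]
          have hms : m = (m - 1) + 1 := by omega
          conv_rhs => rw [hms]
          rw [List.range_succ]
          simp
        rw [hpf]
        apply List.map_congr_left
        intro j hj
        simp only [List.mem_range] at hj
        by_cases hjm : j = m
        · simp [hjm]
        · rw [if_neg hjm]
          by_cases hjl : j < m
          · rw [if_pos hjl, if_pos (by omega)]
          · rw [if_neg hjl, if_neg (by omega)]
theorem occIn_cons (i : Int) (ch : Char) (e : List (Int × Char)) (c : Char) :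
    occIn ((i, ch) :: e) c = (if ch = c then [i] else []) ++ occIn e c := by
  rw [show ((i,ch) :: e) = [(i,ch)] ++ e from rfl, occIn_append, occIn_single]

theorem bucket_length (cs : List Char) (e1 : List (Int × Char)) (c : Char)
    (hle : (occIn e1 c).length ≤ cs.count c) : (bucket cs e1 c).length = cs.count c := by
  simp [bucket]; omega

theorem pyListSet_natCast {xs : List Int} {n : Nat} (h : n < xs.length) (v : Int) :
    pyListSet xs ((n : Nat) : Int) v = xs.set n v := by
  unfold pyListSet
  rw [if_pos (by simp [h])]
  simp

theorem set_middle (L1 M L2 : List Int) (t : Nat) (ht : t < M.length) (v : Int) :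
    (L1 ++ (M ++ L2)).set (L1.length + t) v = L1 ++ ((M.set t v) ++ L2) := by
  rw [List.set_append, if_neg (by omega)]
  congr 1
  rw [Nat.add_sub_cancel_left]
  rw [List.set_append, if_pos ht]

theorem bucket_set (cs : List Char) (e1 : List (Int × Char)) (i : Int) (ch : Char)
    (hlt : (occIn e1 ch).length < cs.count ch) :
    (bucket cs e1 ch).set (occIn e1 ch).length i = bucket cs (e1 ++ [(i, ch)]) ch := by
  unfold bucket
  rw [List.set_append, if_neg (by omega)]
  rw [Nat.sub_self]
  have hrep : List.replicate (cs.count ch - (occIn e1 ch).length) (0 : Int)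
      = 0 :: List.replicate (cs.count ch - (occIn e1 ch).length - 1) 0 := by
    rw [show cs.count ch - (occIn e1 ch).length = (cs.count ch - (occIn e1 ch).length - 1) + 1 by omega]
    rfl
  rw [hrep]
  rw [List.set_cons_zero]
  rw [occIn_append, occIn_single, if_pos rfl]
  have h2 : cs.count ch - ((occIn e1 ch).length + 1) = cs.count ch - (occIn e1 ch).length - 1 := by
    omega
  simp [List.append_assoc, h2]

theorem bucket_other (cs : List Char) (e1 : List (Int × Char)) (i : Int) (ch c : Char)
    (hne : c ≠ ch) : bucket cs (e1 ++ [(i, ch)]) c = bucket cs e1 c := by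
  unfold bucket
  rw [occIn_append, occIn_single, if_neg (fun h => hne h.symm)]
  simp

theorem flatMap_congr_mem {l : List Char} {f g : Char → List Int}
    (h : ∀ a ∈ l, f a = g a) : l.flatMap f = l.flatMap g := by
  induction l with
  | nil => rfl
  | cons a t ih =>
      simp only [List.flatMap_cons, h a (List.mem_cons_self),
        ih (fun b hb => h b (List.mem_cons_of_mem _ hb))]

theorem step_eq (cs alpha : List Char) (hnd : alpha.Nodup) (hmem : ∀ c ∈ cs, c ∈ alpha)
    (e1 : List (Int × Char)) (i : Int) (ch : Char) (e2' : List (Int × Char))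
    (he : e1 ++ (i, ch) :: e2' = PySem.List.enumerate cs 0) :
    stepF alpha (orderModel cs alpha e1, posModel cs alpha e1) (i, ch)
      = (orderModel cs alpha (e1 ++ [(i, ch)]), posModel cs alpha (e1 ++ [(i, ch)])) := by
  have hch : ch ∈ cs := by
    have hm : (i, ch) ∈ PySem.List.enumerate cs 0 := by
      rw [← he]; exact List.mem_append_right _ (List.mem_cons_self)
    exact snd_mem_of_mem_enumerate hm
  have hcha : ch ∈ alpha := hmem ch hch
  obtain ⟨pre, post, halpha⟩ := List.append_of_mem hcha
  have hnd' : (pre ++ ch :: post).Nodup := halpha ▸ hnd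
  have hmid : (ch :: (pre ++ post)).Nodup := List.nodup_middle.mp hnd'
  have hpre : ch ∉ pre := fun hin =>
    (List.nodup_cons.mp hmid).1 (List.mem_append_left _ hin)
  have hpost : ch ∉ post := fun hin =>
    (List.nodup_cons.mp hmid).1 (List.mem_append_right _ hin)
  have hidx : List.idxOf ch alpha = pre.length := by
    rw [halpha, List.idxOf_append, if_neg hpre, List.idxOf_cons_self]
    simp
  have hjk : pre.length < alpha.length := by
    rw [halpha]; simp
  have hgdch : alpha.getD pre.length ' ' = ch := by
    rw [halpha]
    rw [List.getD_eq_getElem _ _ (by simp : pre.length < (pre ++ ch :: post).length)]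
    rw [List.getElem_append_right (le_refl _)]
    simp
  have hcountFull : ∀ c, (occIn (PySem.List.enumerate cs 0) c).length = cs.count c := by
    intro c; rw [length_occIn, countP_enumerate]
  have hle : ∀ c, (occIn e1 c).length ≤ cs.count c := by
    intro c
    rw [← hcountFull c, ← he, occIn_append]
    simp
  have hlt : (occIn e1 ch).length < cs.count ch := by
    rw [← hcountFull ch, ← he, occIn_append, occIn_cons, if_pos rfl]
    simp
  -- the value read from pos
  have hread : PySem.List.pyGetD (posModel cs alpha e1) ((List.idxOf ch alpha : Nat) : Int) 0
      = ((baseN cs alpha pre.length + (occIn e1 ch).length : Nat) : Int) := by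
    rw [hidx]
    unfold posModel
    rw [pyGetD_map_range _ _ hjk, hgdch]
  -- length of the flattened prefix
  have hlen1 : (pre.flatMap (bucket cs e1)).length = baseN cs alpha pre.length := by
    rw [List.length_flatMap]
    unfold baseN
    rw [halpha, List.take_left]
    congr 1
    exact List.map_congr_left (fun c _ => bucket_length cs e1 c (hle c))
  simp only [stepF]
  rw [Prod.mk.injEq]
  constructor
  -- order component
  · show pyListSet (orderModel cs alpha e1)
        (PySem.List.pyGetD (posModel cs alpha e1) ((List.idxOf ch alpha : Nat) : Int) 0) i
      = orderModel cs alpha (e1 ++ [(i, ch)])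
    rw [hread]
    have horder : orderModel cs alpha e1
        = pre.flatMap (bucket cs e1) ++ (bucket cs e1 ch ++ post.flatMap (bucket cs e1)) := by
      rw [orderModel, halpha, List.flatMap_append, List.flatMap_cons]
    have hlenlt : baseN cs alpha pre.length + (occIn e1 ch).length
        < (orderModel cs alpha e1).length := by
      rw [horder]
      simp only [List.length_append]
      have := bucket_length cs e1 ch (hle ch)
      omega
    rw [pyListSet_natCast hlenlt]
    rw [horder, ← hlen1, set_middle _ _ _ _ (by rw [bucket_length cs e1 ch (hle ch)]; exact hlt)]
    rw [bucket_set cs e1 i ch hlt]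
    have hpreF : pre.flatMap (bucket cs e1) = pre.flatMap (bucket cs (e1 ++ [(i, ch)])) := by
      apply flatMap_congr_mem
      intro a ha
      exact (bucket_other cs e1 i ch a (fun h => hpre (h ▸ ha))).symm
    have hpostF : post.flatMap (bucket cs e1) = post.flatMap (bucket cs (e1 ++ [(i, ch)])) := by
      apply flatMap_congr_mem
      intro a ha
      exact (bucket_other cs e1 i ch a (fun h => hpost (h ▸ ha))).symm
    rw [hpreF, hpostF, orderModel, halpha, List.flatMap_append, List.flatMap_cons]
  -- pos component
  · show pyListSet (posModel cs alpha e1) ((List.idxOf ch alpha : Nat) : Int)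
        (PySem.List.pyGetD (posModel cs alpha e1) ((List.idxOf ch alpha : Nat) : Int) 0 + 1)
      = posModel cs alpha (e1 ++ [(i, ch)])
    rw [hread, hidx]
    unfold posModel
    rw [pyListSet_map_range _ _ hjk]
    apply List.map_congr_left
    intro j hj
    simp only [List.mem_range] at hj
    by_cases hjp : j = pre.length
    · subst hjp
      rw [if_pos rfl, hgdch, occIn_append, occIn_single, if_pos rfl]
      push_cast
      simp [List.length_append]
      ring
    · rw [if_neg hjp]
      have hgd : alpha.getD j ' ' ≠ ch := by
        intro h
        exact hjp (((getD_eq_iff_idxOf alpha hnd ch hcha hj).mp h).trans hidx)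
      rw [occIn_append, occIn_single, if_neg (fun h => hgd h.symm)]
      simp
theorem scatter (cs alpha : List Char) (hnd : alpha.Nodup) (hmem : ∀ c ∈ cs, c ∈ alpha) :
    ∀ (e2 e1 : List (Int × Char)), e1 ++ e2 = PySem.List.enumerate cs 0 →
    e2.foldl (stepF alpha) (orderModel cs alpha e1, posModel cs alpha e1)
      = (orderModel cs alpha (PySem.List.enumerate cs 0),
         posModel cs alpha (PySem.List.enumerate cs 0)) := by
  intro e2
  induction e2 with
  | nil =>
      intro e1 he
      simp only [List.append_nil] at he
      rw [he]
      rfl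
  | cons p e2' ih =>
      intro e1 he
      obtain ⟨i, ch⟩ := p
      simp only [List.foldl_cons]
      rw [step_eq cs alpha hnd hmem e1 i ch e2' he]
      exact ih (e1 ++ [(i, ch)]) (by simpa [List.append_assoc] using he)

theorem orderModel_nil (cs alpha : List Char) (hnd : alpha.Nodup)
    (hmem : ∀ c ∈ cs, c ∈ alpha) :
    orderModel cs alpha [] = List.replicate cs.length 0 := by
  unfold orderModel
  have hb : ∀ c, bucket cs [] c = List.replicate (cs.count c) (0 : Int) := by
    intro c; simp [bucket, occIn_nil]
  rw [flatMap_congr_mem (fun a _ => hb a), flatMap_replicate,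
    sum_counts alpha cs hnd hmem]

theorem posModel_nil (cs alpha : List Char) :
    posModel cs alpha []
      = (List.range alpha.length).map (fun j => ((baseN cs alpha j : Nat) : Int)) := by
  unfold posModel
  simp [occIn_nil]

theorem orderModel_full (cs alpha : List Char) :
    orderModel cs alpha (PySem.List.enumerate cs 0)
      = alpha.flatMap (fun c => occIn (PySem.List.enumerate cs 0) c) := by
  unfold orderModel
  apply flatMap_congr_mem
  intro c _
  have h := length_occIn (PySem.List.enumerate cs 0) c
  rw [countP_enumerate] at h
  simp [bucket, h]

theorem baseN_cast (cs alpha : List Char) :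
    ∀ j, j ≤ alpha.length →
    ((List.range j).map (fun j' => ((cs.count (alpha.getD j' ' ') : Nat) : Int))).sum
      = ((baseN cs alpha j : Nat) : Int) := by
  intro j
  induction j with
  | zero => intro _; simp [baseN]
  | succ j ih =>
      intro hj
      rw [List.range_succ, List.map_append, List.sum_append, ih (by omega)]
      have hjl : j < alpha.length := by omega
      have htake : alpha.take (j + 1) = alpha.take j ++ [alpha[j]] := by
        rw [List.take_succ]
        simp [List.getElem?_eq_getElem hjl]
      unfold baseN
      rw [htake, List.map_append, List.sum_append]
      simp [List.getElem?_eq_getElem hjl]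

theorem countStep_of_get? {d : PySem.Dict Char Int} {c : Char} {j : Int}
    (h : d.get? c = some j) (cnt : List Int) :
    countStep d cnt c = pyListSet cnt j (PySem.List.pyGetD cnt j 0 + 1) := by
  simp [countStep, h]

theorem main_eq (s : String) : sort_characters_local s = sort_characters_local_alt s := by
  by_cases h0 : s.toList = []
  · simp [sort_characters_local, sort_characters_local_alt, h0, PySem.Str.len_eq,
      PySem.List.pyRepeat_singleton, PySem.List.pyRange_one_eq_nil (le_refl (0 : Int)),
      PySem.Set.ofList_nil]
  · simp only [sort_characters_local, sort_characters_local_alt, PySem.Str.len_eq]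
    set cs := s.toList with hcs
    set alpha := PySem.List.sorted (PySem.Set.ofList cs) (fun c => c) false with halphadef
    have hnd : alpha.Nodup :=
      (PySem.List.sorted_perm _ _ _).nodup_iff.mpr (PySem.Set.nodup_ofList cs)
    have hmem : ∀ c ∈ cs, c ∈ alpha := fun c hc =>
      (PySem.List.mem_sorted _ _ _ _).mpr ((PySem.Set.mem_ofList _ _).mpr hc)
    have hk1 : 1 ≤ alpha.length := by
      rcases cs with _ | ⟨c, t⟩
      · exact absurd rfl h0
      · have := hmem c (List.mem_cons_self)
        exact List.length_pos_of_mem this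
    set d := List.foldl (fun d p => d.insert p.2 p.1) PySem.Dict.empty
      (PySem.List.enumerate alpha 0) with hd
    -- B side: inner loop appends the occurrence indices, outer loop is a flatMap
    rw [PySem.List.foldl_congr_mem alpha _
      (fun (order : List Int) c => order ++ occIn (PySem.List.enumerate cs 0) c) []
      (by
        intro acc c _
        rw [PySem.List.foldl_append_if]
        rfl)]
    rw [PySem.List.foldl_append_eq_flatMap, List.nil_append]
    -- count/pos initial arrays
    have hrepk : PySem.List.pyRepeat [(0 : Int)] ((alpha.length : Nat) : Int)
        = (List.range alpha.length).map (fun _ => (0 : Int)) := by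
      rw [PySem.List.pyRepeat_singleton, map_range_zero_eq_replicate]
      simp
    rw [hrepk]
    -- count loop
    rw [PySem.List.foldl_congr_mem cs (countStep d)
      (fun cnt ch => pyListSet cnt ((List.idxOf ch alpha : Nat) : Int)
        (PySem.List.pyGetD cnt ((List.idxOf ch alpha : Nat) : Int) 0 + 1)) _
      (fun acc x hx => countStep_of_get? (dict_get alpha hnd x (hmem x hx)) acc)]
    rw [count_fold alpha hnd cs hmem (fun _ => (0 : Int))]
    have hcnt2 : (List.range alpha.length).map
          (fun j => (fun _ => (0 : Int)) j + ((cs.count (alpha.getD j ' ') : Nat) : Int))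
        = (List.range alpha.length).map
          (fun j => ((cs.count (alpha.getD j ' ') : Nat) : Int)) := by
      apply List.map_congr_left; intro j _; ring
    rw [hcnt2]
    -- pos loop (prefix sums)
    rw [pos_fold alpha.length (fun j => ((cs.count (alpha.getD j ' ') : Nat) : Int))
      alpha.length hk1 (le_refl _)]
    have hposmap : (List.range alpha.length).map
          (fun j => if j < alpha.length
            then ((List.range j).map (fun j' => ((cs.count (alpha.getD j' ' ') : Nat) : Int))).sum
            else 0)
        = posModel cs alpha [] := by
      rw [posModel_nil]
      apply List.map_congr_left
      intro j hj
      simp only [List.mem_range] at hj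
      rw [if_pos hj]
      exact baseN_cast cs alpha j (le_of_lt hj)
    rw [hposmap]
    -- scatter initial order array
    have hrepn : PySem.List.pyRepeat [(0 : Int)] ((cs.length : Nat) : Int)
        = orderModel cs alpha [] := by
      rw [PySem.List.pyRepeat_singleton, orderModel_nil cs alpha hnd hmem]
      simp
    rw [hrepn]
    -- scatter loop: body is stepF on the enumerated characters
    rw [PySem.List.foldl_congr_mem _ (scatterStep d s)
      (fun st i => stepF alpha st (i, PySem.List.pyGetD cs i ' ')) _
      (by
        intro st i hi
        rw [PySem.List.mem_pyRange_one] at hi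
        obtain ⟨h0i, h1i⟩ := hi
        have hlt : i.toNat < cs.length := by omega
        have hnat : i = ((i.toNat : Nat) : Int) := (Int.toNat_of_nonneg h0i).symm
        have hget : PySem.List.pyGet? s.toList i = some cs[i.toNat] := by
          have hg := PySem.List.pyGet?_natCast s.toList i.toNat
          rw [← hnat] at hg
          rw [hg]
          exact List.getElem?_eq_getElem hlt
        have hgd : PySem.List.pyGetD cs i ' ' = cs[i.toNat] := by
          have hg := PySem.List.pyGetD_natCast cs i.toNat ' '
          rw [← hnat] at hg
          rw [hg]
          exact List.getD_eq_getElem _ _ hlt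
        have hchm : cs[i.toNat] ∈ cs := List.getElem_mem _
        have hdg : d.get? cs[i.toNat] = some ((List.idxOf cs[i.toNat] alpha : Nat) : Int) := by
          rw [hd]; exact dict_get alpha hnd _ (hmem _ hchm)
        simp [scatterStep, stepF, hget, hgd, hdg])]
    have hfold : List.foldl (fun st i => stepF alpha st (i, PySem.List.pyGetD cs i ' '))
          (orderModel cs alpha [], posModel cs alpha [])
          (PySem.List.pyRange 0 ((cs.length : Nat) : Int) 1)
        = List.foldl (stepF alpha) (orderModel cs alpha [], posModel cs alpha [])
          (PySem.List.enumerate cs 0) := by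
      conv_rhs => rw [PySem.List.enumerate_eq_map_pyRange cs ' ']
      simp only [List.foldl_map, PySem.List.len_eq]
    rw [hfold, scatter cs alpha hnd hmem (PySem.List.enumerate cs 0) [] (by simp)]
    rw [orderModel_full]


-- ===== VERDICT (by name: the statement is the Claim_ definition above) =====
theorem sort_characters_local_spec : Claim_equal_sort_characters_local := by
  intro s _
  unfold Spec_sort_characters_local
  exact main_eq s
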